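-- pv_equiv track=rewrite | github.com/LUCAS-LYX025/Test | test/enhanced_test_runner.py | _extract_error_for_test
-- ===== SOURCE A (Python) =====
-- def _extract_error_for_test(stdout: str, test_name: str) -> str:
--     """提取特定测试的错误信息"""
--     lines = stdout.split('\n')
--     error_lines = []
--     capture_error = False
--
--     for line in lines:
--         if test_name in line and ('FAIL' in line or 'ERROR' in line):
--             capture_error = True
--             continue
--
--         if capture_error:
--             if line.strip().startswith('---') or line.strip().startswith('Ran') or not line.strip():
--                 break
--             if 'File' in line and '.py' in line and 'line' in line:
--                 continue
--             error_lines.append(line.strip())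
--
--     return '\n'.join(error_lines) if error_lines else "测试执行失败"
-- ===== SOURCE B (Python) =====
-- def _extract_error_for_test(stdout: str, test_name: str) -> str:
--     """提取特定测试的错误信息"""
--     lines = stdout.split('\n')
--
--     def anchor(l):
--         return test_name in l and ('FAIL' in l or 'ERROR' in l)
--
--     def stop(l):
--         s = l.strip()
--         return not anchor(l) and (s.startswith('---') or s.startswith('Ran') or not s)
--
--     # staged, declarative pipeline: index lists + slicing + one comprehension
--     anchors = [i for i, l in enumerate(lines) if anchor(l)]
--     if not anchors:
--         return "测试执行失败"
--     region = lines[anchors[0] + 1:]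
--     stops = [i for i, l in enumerate(region) if stop(l)]
--     if stops:
--         region = region[:stops[0]]
--     kept = [l.strip() for l in region
--             if not anchor(l) and not ('File' in l and '.py' in l and 'line' in l)]
--     return '\n'.join(kept) if kept else "测试执行失败"
-- ===== Notes on version B (the rewrite author's own statement) =====
-- stated objective: alternative
-- what changed: Replaces A's single stateful loop with a capture flag, break and continue by a loop-free staged pipeline: build the enumerate-index lists of anchor and terminator lines, slice the line list between the first anchor and the first terminator, then one filter-map comprehension strips and keeps the remaining lines.
import Mathlib
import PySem

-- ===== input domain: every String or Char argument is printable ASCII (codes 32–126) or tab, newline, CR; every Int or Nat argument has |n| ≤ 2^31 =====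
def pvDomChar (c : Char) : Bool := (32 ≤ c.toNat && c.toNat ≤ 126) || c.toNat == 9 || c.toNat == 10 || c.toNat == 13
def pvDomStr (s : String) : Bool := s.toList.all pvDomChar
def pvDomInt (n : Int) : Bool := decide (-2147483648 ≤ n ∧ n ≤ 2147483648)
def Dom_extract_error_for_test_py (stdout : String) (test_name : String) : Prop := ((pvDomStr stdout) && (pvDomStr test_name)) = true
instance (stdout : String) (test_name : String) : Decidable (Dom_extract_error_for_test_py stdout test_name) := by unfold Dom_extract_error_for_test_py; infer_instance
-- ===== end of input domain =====

-- B replaces A's single stateful loop (capture flag, break/continue) by a staged, declarative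
-- pipeline: enumerate-index lists for the anchor and the terminator, slicing, and one
-- filter-map comprehension; objective: alternative (same O(n) cost, loop-free decomposition).

-- ===== PORT A =====
-- the one for-loop of A: state = (error_lines accumulator, capture_error flag); 'break' returns acc
def pvALoop (tn : List Char) : List (List Char) → List (List Char) → Bool → List (List Char)
  | [], acc, _ => acc
  | l :: rest, acc, cap =>
    if PySem.Chars.isIn tn l && (PySem.Chars.isIn "FAIL".toList l || PySem.Chars.isIn "ERROR".toList l) then
      pvALoop tn rest acc true
    else if cap then
      if PySem.Chars.startswith (PySem.Chars.strip l) "---".toList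
          || PySem.Chars.startswith (PySem.Chars.strip l) "Ran".toList
          || (PySem.Chars.strip l).isEmpty then acc
      else if PySem.Chars.isIn "File".toList l && PySem.Chars.isIn ".py".toList l && PySem.Chars.isIn "line".toList l then
        pvALoop tn rest acc cap
      else pvALoop tn rest (acc ++ [PySem.Chars.strip l]) cap
    else pvALoop tn rest acc cap

def extract_error_for_test_py (stdout : String) (test_name : String) : String :=
  let lines := PySem.Chars.splitOn stdout.toList "\n".toList
  let error_lines := pvALoop test_name.toList lines [] false
  if error_lines ≠ [] then String.ofList (PySem.Chars.join "\n".toList error_lines) else "测试执行失败"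

-- ===== PORT B =====
-- Source B's anchor(l)
def pvAnchorB (tn l : List Char) : Bool :=
  PySem.Chars.isIn tn l && (PySem.Chars.isIn "FAIL".toList l || PySem.Chars.isIn "ERROR".toList l)

-- Source B's stop(l)
def pvStopB (tn l : List Char) : Bool :=
  let s := PySem.Chars.strip l
  !pvAnchorB tn l && (PySem.Chars.startswith s "---".toList || PySem.Chars.startswith s "Ran".toList || s.isEmpty)

-- Source B's 'File' in l and '.py' in l and 'line' in l
def pvFileB (l : List Char) : Bool :=
  PySem.Chars.isIn "File".toList l && PySem.Chars.isIn ".py".toList l && PySem.Chars.isIn "line".toList l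

-- Source B's [i for i, l in enumerate(xs) if p(l)]
def pvIdxWhere (p : List Char → Bool) (xs : List (List Char)) : List Int :=
  ((PySem.List.enumerate xs).filter (fun q => p q.2)).map Prod.fst

def extract_error_for_test_py_alt (stdout : String) (test_name : String) : String :=
  let lines := PySem.Chars.splitOn stdout.toList "\n".toList
  let anchors := pvIdxWhere (pvAnchorB test_name.toList) lines
  match anchors with
  | [] => "测试执行失败"
  | i :: _ =>
    let region := PySem.List.slice lines (some (i + 1)) none
    let stops := pvIdxWhere (pvStopB test_name.toList) region
    let region2 := match stops with
      | [] => region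
      | j :: _ => PySem.List.slice region none (some j)
    let kept := (region2.filter (fun l => !pvAnchorB test_name.toList l && !pvFileB l)).map PySem.Chars.strip
    if kept ≠ [] then String.ofList (PySem.Chars.join "\n".toList kept) else "测试执行失败"

-- ===== PRECONDITION & SPEC =====
def Spec_extract_error_for_test_py (stdout : String) (test_name : String) (out : String) : Prop := out = extract_error_for_test_py_alt stdout test_name
instance (stdout : String) (test_name : String) (out : String) : Decidable (Spec_extract_error_for_test_py stdout test_name out) := by unfold Spec_extract_error_for_test_py; infer_instance

-- ===== CLAIM =====
def Claim_equal_extract_error_for_test_py : Prop := ∀ (stdout : String) (test_name : String), Dom_extract_error_for_test_py stdout test_name → Spec_extract_error_for_test_py stdout test_name (extract_error_for_test_py stdout test_name)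

-- ===== LEMMAS AND PROOFS =====
-- proof-only intermediate: recursive find/collect characterisation shared by both ports
def pvFindRest (tn : List Char) : List (List Char) → Option (List (List Char))
  | [] => none
  | l :: rest => if pvAnchorB tn l then some rest else pvFindRest tn rest

def pvCollect (tn : List Char) : List (List Char) → List (List Char)
  | [] => []
  | l :: rest =>
    if pvAnchorB tn l then pvCollect tn rest
    else
      let s := PySem.Chars.strip l
      if PySem.Chars.startswith s "---".toList || PySem.Chars.startswith s "Ran".toList || s.isEmpty then []
      else if pvFileB l then pvCollect tn rest
      else s :: pvCollect tn rest

-- A's loop in capture mode appends exactly the recursive collection.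
theorem pvALoop_true (tn : List Char) (ls : List (List Char)) :
    ∀ acc, pvALoop tn ls acc true = acc ++ pvCollect tn ls := by
  induction ls with
  | nil => intro acc; simp [pvALoop, pvCollect]
  | cons l rest ih =>
    intro acc
    simp only [pvALoop, pvCollect, pvAnchorB, pvFileB]
    split_ifs with h1 h2 h3 <;> simp [ih]

-- A's loop in search mode is the recursive find followed by the collection.
theorem pvALoop_false (tn : List Char) (ls : List (List Char)) :
    pvALoop tn ls [] false = (pvFindRest tn ls).elim [] (pvCollect tn) := by
  induction ls with
  | nil => simp [pvALoop, pvFindRest]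
  | cons l rest ih =>
    simp only [pvALoop, pvFindRest, pvAnchorB, Bool.and_eq_true, Bool.or_eq_true,
      Bool.false_eq_true, if_false]
    split_ifs with h1
    · simp [pvALoop_true]
    · exact ih

-- index lists: shifting the enumeration start shifts every index
theorem pvIdx_shift (p : List Char → Bool) (xs : List (List Char)) :
    ∀ s : Int, ((PySem.List.enumerate xs (s + 1)).filter (fun q => p q.2)).map Prod.fst
      = (((PySem.List.enumerate xs s).filter (fun q => p q.2)).map Prod.fst).map (· + 1) := by
  induction xs with
  | nil => intro s; simp [PySem.List.enumerate_nil]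
  | cons l rest ih =>
    intro s
    simp only [PySem.List.enumerate_cons, List.filter_cons]
    split_ifs with h <;> simp [ih (s + 1), ih s]

theorem pvIdx_nonneg (p : List Char → Bool) (xs : List (List Char)) :
    ∀ (s : Int), 0 ≤ s → ∀ i ∈ ((PySem.List.enumerate xs s).filter (fun q => p q.2)).map Prod.fst, 0 ≤ i := by
  induction xs with
  | nil => intro s _ i hi; simp [PySem.List.enumerate_nil] at hi
  | cons l rest ih =>
    intro s hs i hi
    simp only [PySem.List.enumerate_cons, List.filter_cons] at hi
    split_ifs at hi with h
    · simp only [List.map_cons, List.mem_cons] at hi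
      rcases hi with rfl | hi
      · exact hs
      · exact ih (s + 1) (by omega) i hi
    · exact ih (s + 1) (by omega) i hi

-- stage 1 of B: head of the anchor-index list = the recursive find
theorem pvStage1 (tn : List Char) (ls : List (List Char)) :
    (match pvIdxWhere (pvAnchorB tn) ls with
      | [] => none
      | i :: _ => some (PySem.List.slice ls (some (i + 1)) none))
    = pvFindRest tn ls := by
  induction ls with
  | nil => simp [pvIdxWhere, PySem.List.enumerate_nil, pvFindRest]
  | cons l rest ih =>
    simp only [pvIdxWhere, PySem.List.enumerate_cons, List.filter_cons, pvFindRest] at *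
    split_ifs with h
    · simp only [List.map_cons]
      rw [PySem.List.slice_from (l :: rest) (by omega : (0:Int) ≤ 0 + 1)]
      norm_num
    · rw [pvIdx_shift (pvAnchorB tn) rest 0]
      rcases hE : ((PySem.List.enumerate rest 0).filter (fun q => pvAnchorB tn q.2)).map Prod.fst with _ | ⟨i, is⟩
      · simpa [hE] using ih
      · have hnn : 0 ≤ i := pvIdx_nonneg (pvAnchorB tn) rest 0 le_rfl i (by simp [hE])
        simp only [hE, List.map_cons] at ih ⊢
        rw [PySem.List.slice_from (l :: rest) (by omega : (0:Int) ≤ i + 1 + 1)]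
        rw [PySem.List.slice_from rest (by omega : (0:Int) ≤ i + 1)] at ih
        rw [show (i + 1 + 1).toNat = (i + 1).toNat + 1 by omega, List.drop_succ_cons]
        exact ih

-- stage 2 of B: truncate at the first stop index, then filter-map = the recursive collection
theorem pvStage2 (tn : List Char) (ls : List (List Char)) :
    ((match pvIdxWhere (pvStopB tn) ls with
        | [] => ls
        | j :: _ => PySem.List.slice ls none (some j)).filter
      (fun l => !pvAnchorB tn l && !pvFileB l)).map PySem.Chars.strip
    = pvCollect tn ls := by
  induction ls with
  | nil => simp [pvIdxWhere, PySem.List.enumerate_nil, pvCollect]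
  | cons l rest ih =>
    simp only [pvIdxWhere, PySem.List.enumerate_cons, List.filter_cons] at *
    by_cases hs : pvStopB tn l = true
    · -- first stop is here: region2 = take 0 = [], and the collection stops too
      have hna : pvAnchorB tn l = false := by
        simp only [pvStopB, Bool.and_eq_true, Bool.not_eq_true'] at hs
        exact hs.1
      simp only [hs, if_true, List.map_cons]
      rw [PySem.List.slice_to (l :: rest) le_rfl]
      simp only [Int.toNat_zero, List.take_zero, List.filter_nil, List.map_nil]
      simp only [pvCollect, hna, Bool.false_eq_true, if_false]
      have hterm : (PySem.Chars.startswith (PySem.Chars.strip l) "---".toList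
          || PySem.Chars.startswith (PySem.Chars.strip l) "Ran".toList
          || (PySem.Chars.strip l).isEmpty) = true := by
        simp only [pvStopB, Bool.and_eq_true] at hs
        exact hs.2
      simp only [hterm, if_true]
    · -- not a stop line: the stop-index list shifts; split on anchor / File / kept
      rw [Bool.not_eq_true] at hs
      simp only [hs, Bool.false_eq_true, if_false]
      rw [pvIdx_shift (pvStopB tn) rest 0]
      have hshape : ∀ (r2 : List (List Char)),
          ((l :: r2).filter (fun l => !pvAnchorB tn l && !pvFileB l)).map PySem.Chars.strip
          = (if pvAnchorB tn l then [] else if pvFileB l then [] else [PySem.Chars.strip l])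
            ++ (r2.filter (fun l => !pvAnchorB tn l && !pvFileB l)).map PySem.Chars.strip := by
        intro r2
        simp only [List.filter_cons]
        split_ifs with h1 h2 h3 h4 h5 <;> simp_all
      have hcol : pvCollect tn (l :: rest)
          = (if pvAnchorB tn l then [] else if pvFileB l then [] else [PySem.Chars.strip l])
            ++ pvCollect tn rest := by
        by_cases ha : pvAnchorB tn l
        · simp [pvCollect, ha]
        · have ha' : pvAnchorB tn l = false := by simpa using ha
          have hterm : (PySem.Chars.startswith (PySem.Chars.strip l) "---".toList
              || PySem.Chars.startswith (PySem.Chars.strip l) "Ran".toList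
              || (PySem.Chars.strip l).isEmpty) = false := by
            simp only [pvStopB, ha', Bool.not_false, Bool.true_and] at hs
            simpa using hs
          simp only [pvCollect, ha, Bool.false_eq_true, if_false, hterm]
          split_ifs <;> simp
      rw [hcol]
      rcases hE : ((PySem.List.enumerate rest 0).filter (fun q => pvStopB tn q.2)).map Prod.fst with _ | ⟨j, js⟩
      · simp only [hE, List.map_nil] at ih ⊢
        rw [hshape rest, ih]
      · have hnn : 0 ≤ j := pvIdx_nonneg (pvStopB tn) rest 0 le_rfl j (by simp [hE])
        simp only [hE, List.map_cons] at ih ⊢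
        rw [PySem.List.slice_to rest hnn] at ih
        rw [PySem.List.slice_to (l :: rest) (by omega : (0:Int) ≤ j + 1)]
        rw [show (j + 1).toNat = j.toNat + 1 by omega, List.take_succ_cons, hshape, ih]

-- ===== VERDICT =====
theorem extract_error_for_test_py_spec : Claim_equal_extract_error_for_test_py := by
  unfold Claim_equal_extract_error_for_test_py
  intro stdout tn _
  simp only [Spec_extract_error_for_test_py, extract_error_for_test_py,
    extract_error_for_test_py_alt]
  rw [pvALoop_false]
  rw [← pvStage1 tn.toList]
  rcases hA : pvIdxWhere (pvAnchorB tn.toList) (PySem.Chars.splitOn stdout.toList "\n".toList) with _ | ⟨i, is⟩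
  · simp
  · simp only [Option.elim]
    rw [← pvStage2 tn.toList]
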